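-- pv_equiv track=rewrite | github.com/alart27/ege_2020 | python_files/informatics_mccme/problem_arrays_I.py | min_odd_element
-- ===== SOURCE A (Python) =====
-- def min_odd_element(array):
--
--     min_odd = 0
--
--     for n in array:
--         if n % 2 != 0 and min_odd % 2 == 0:
--             min_odd = n
--         elif n % 2 != 0 and n < min_odd:
--             min_odd = n
--
--     return min_odd
-- ===== SOURCE B (Python) =====
-- def min_odd_element(array):
--     odds = [n for n in array if n % 2 != 0]
--     return min(odds) if odds else 0
-- ===== Notes on version B (the rewrite author's own statement) =====
-- stated objective: simpler
-- what changed: Replaces A's single loop with a sentinel-flagged running minimum (min_odd=0 doubling as the 'no odd yet' flag) by a filter-then-reduce decomposition: collect the odd elements, then take their minimum, returning 0 when there are none.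
import Mathlib
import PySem

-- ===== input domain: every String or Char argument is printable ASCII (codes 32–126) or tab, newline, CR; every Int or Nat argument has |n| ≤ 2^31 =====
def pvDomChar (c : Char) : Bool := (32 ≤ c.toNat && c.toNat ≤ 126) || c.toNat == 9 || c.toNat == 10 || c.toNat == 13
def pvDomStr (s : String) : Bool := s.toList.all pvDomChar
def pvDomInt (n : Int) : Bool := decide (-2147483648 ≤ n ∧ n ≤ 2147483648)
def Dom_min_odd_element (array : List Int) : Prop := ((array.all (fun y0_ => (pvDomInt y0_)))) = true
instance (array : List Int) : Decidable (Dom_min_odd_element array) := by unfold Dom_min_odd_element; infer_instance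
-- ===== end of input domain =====

-- B replaces A's sentinel-flagged running minimum with filter-then-min (returning 0 on no odds); objective: simpler.

-- ===== PORT A =====
def min_odd_element (array : List Int) : Int :=
  array.foldl (fun min_odd n =>
    if PySem.Int.mod n 2 ≠ 0 ∧ PySem.Int.mod min_odd 2 = 0 then n
    else if PySem.Int.mod n 2 ≠ 0 ∧ n < min_odd then n
    else min_odd) 0

-- ===== PORT B =====
def min_odd_element_alt (array : List Int) : Int :=
  let odds := array.filter (fun n => PySem.Int.mod n 2 ≠ 0)
  match PySem.List.min? odds (fun x => x) with
  | some m => m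
  | none => 0

-- ===== PRECONDITION & SPEC =====
def Spec_min_odd_element (array : List Int) (out : Int) : Prop := out = min_odd_element_alt array
instance (array : List Int) (out : Int) : Decidable (Spec_min_odd_element array out) := by unfold Spec_min_odd_element; infer_instance

-- ===== CLAIM (what is proved, stated in full; the proofs are below) =====
def Claim_equal_min_odd_element : Prop := ∀ (array : List Int), Dom_min_odd_element array → Spec_min_odd_element array (min_odd_element array)

-- ===== LEMMAS AND PROOFS =====

-- invariant: once the accumulator is odd, A's loop is a running minimum over the odd elements
theorem foldA_odd (t : List Int) : ∀ (acc : Int), PySem.Int.mod acc 2 ≠ 0 →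
    t.foldl (fun min_odd n =>
      if PySem.Int.mod n 2 ≠ 0 ∧ PySem.Int.mod min_odd 2 = 0 then n
      else if PySem.Int.mod n 2 ≠ 0 ∧ n < min_odd then n
      else min_odd) acc
    = (t.filter (fun n => PySem.Int.mod n 2 ≠ 0)).foldl min acc := by
  induction t with
  | nil => intro acc _; rfl
  | cons n t ih =>
    intro acc hacc
    rw [List.foldl_cons, List.filter_cons]
    by_cases hn : PySem.Int.mod n 2 ≠ 0
    · rw [if_neg (by exact fun h => hacc h.2)]
      by_cases hlt : n < acc
      · rw [if_pos ⟨hn, hlt⟩, if_pos (by simpa using hn), List.foldl_cons, ih n hn]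
        congr 1
        omega
      · rw [if_neg (by exact fun h => hlt h.2), if_pos (by simpa using hn), List.foldl_cons,
          ih acc hacc]
        congr 1
        omega
    · rw [if_neg (by exact fun h => hn h.1), if_neg (by exact fun h => hn h.1)]
      rw [if_neg (by simpa using hn)]
      exact ih acc hacc

theorem min_odd_main (array : List Int) :
    min_odd_element array = min_odd_element_alt array := by
  unfold min_odd_element min_odd_element_alt
  induction array with
  | nil => rfl
  | cons n t ih =>
    rw [List.foldl_cons]
    simp only [List.filter_cons]
    by_cases hn : PySem.Int.mod n 2 ≠ 0
    · rw [if_pos ⟨hn, by decide⟩, if_pos (by simpa using hn)]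
      rw [foldA_odd t n hn, PySem.List.min?_id_cons]
    · rw [if_neg (by exact fun h => hn h.1), if_neg (by exact fun h => hn h.1)]
      rw [if_neg (by simpa using hn)]
      exact ih

-- ===== VERDICT (by name: the statement is the Claim_ definition above) =====
theorem min_odd_element_spec : Claim_equal_min_odd_element := by
  intro array _
  unfold Spec_min_odd_element
  exact min_odd_main array
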